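-- pv_equiv track=rewrite | github.com/pypi-data/pypi-mirror-96 | packages/url-param-sorted/url-param-sorted-0.0.2.tar.gz/url-param-sorted-0.0.2/url_param_sorted/__init__.py | url_param_sorted
-- ===== SOURCE A (Python) =====
-- def url_param_sorted(query):
--     """
--     Сортирует параметры url в порядке их возрастания
--     """
--     param = None
--
--     if isinstance(query, str):
--         param = {}
--         for i in query.split("&"):
--             z = i.split("=", maxsplit=1)
--             if len(z) == 1:
--                 x, y = z[0], None
--             else:
--                 x, y = z
--             param.setdefault(x, [])
--             param[x].append(y)
--     elif isinstance(query, dict):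
--         param = query
--     else:
--         raise TypeError("Аргумент может быть только str или dict")
--
--
--     key = lambda s: "" if s is None else f"={s}"
--
--     new_query = []
--     for k in sorted(param.keys(), key=str):
--         v = param[k]
--         if not isinstance(v, list):
--             v = [v]
--         for i in sorted(v, key=key):
--             if i is None:
--                 i = k
--             else:
--                 i = f"{k}={i}"
--             new_query.append(i)
--
--     return "&".join(new_query)
-- ===== SOURCE B (Python) =====
-- def url_param_sorted(query):
--     """
--     Sort URL query parameters ascending (flat single sort, no grouping dict).
--     """
--     if isinstance(query, str):
--         # Each '&'-segment already IS its own serialized form; sort segments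
--         # once by the pair (key, "" or "="+value) and join.
--         def pair(seg):
--             z = seg.split("=", maxsplit=1)
--             return (z[0], "") if len(z) == 1 else (z[0], "=" + z[1])
--         return "&".join(sorted(query.split("&"), key=pair))
--     elif isinstance(query, dict):
--         triples = []
--         for k, v in query.items():
--             if not isinstance(v, list):
--                 v = [v]
--             for i in v:
--                 sk = "" if i is None else f"={i}"
--                 triples.append((str(k), sk, str(k) if i is None else f"{k}={i}"))
--         triples.sort(key=lambda t: (t[0], t[1]))
--         return "&".join(t[2] for t in triples)
--     else:
--         raise TypeError("Аргумент может быть только str или dict")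
-- ===== Notes on version B (the rewrite author's own statement) =====
-- stated objective: simpler
-- what changed: B drops A's group-into-dict plus nested key/value sorts entirely: each ampersand-separated segment already is its own serialized form, so B sorts the segment list once by the composite key (key part, empty-or-equals-prefixed value part) and joins it.
import Mathlib
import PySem

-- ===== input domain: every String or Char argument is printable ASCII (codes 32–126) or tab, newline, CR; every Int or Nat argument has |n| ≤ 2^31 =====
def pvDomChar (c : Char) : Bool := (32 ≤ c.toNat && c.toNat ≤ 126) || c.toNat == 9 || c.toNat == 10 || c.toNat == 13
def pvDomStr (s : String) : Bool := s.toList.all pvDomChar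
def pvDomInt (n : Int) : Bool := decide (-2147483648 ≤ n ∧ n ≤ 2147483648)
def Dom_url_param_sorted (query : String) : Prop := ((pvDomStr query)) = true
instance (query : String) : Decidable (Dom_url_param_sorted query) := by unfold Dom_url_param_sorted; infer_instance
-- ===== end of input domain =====

-- B replaces A's group-into-dict + nested sorted loops by one flat sort of the
-- '&'-segments under the composite key (key, ''|'='+value); objective: simpler.

-- ===== PORT A =====
-- i.split("=", maxsplit=1); exact (separator "=" is non-empty, maxsplit = 1)
def pvSplitEq1 (s : String) : List String :=
  (PySem.Chars.splitOnMax s.toList ['='] 1 ).map String.ofList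

def url_param_sorted (query : String) : String :=
  -- query.split("&")  (exact: separator non-empty)
  let segs := (PySem.Chars.splitOn query.toList ['&']).map String.ofList
  -- the grouping loop: param.setdefault(x, []); param[x].append(y)
  let param : PySem.Dict String (List (Option String)) :=
    segs.foldl (fun d i =>
      let z := pvSplitEq1 i
      let x := (PySem.List.pyGet? z 0).getD ""   -- z[0]; split never returns []
      let y : Option String :=
        if z.length = 1 then none else some ((PySem.List.pyGet? z 1).getD "")
      let d1 := d.setdefault x []
      d1.insert x (d1.getD x [] ++ [y])) PySem.Dict.empty
  -- key = lambda s: "" if s is None else f"={s}"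
  let key : Option String → String := fun s => match s with | none => "" | some v => "=" ++ v
  -- the two nested loops building new_query (str(k) = k on string keys; v is always a list here)
  let newQuery : List String :=
    (PySem.List.sorted param.keys (fun s => s) false).foldl (fun acc k =>
      (PySem.List.sorted (param.getD k []) key false).foldl (fun acc i =>
        acc ++ [match i with | none => k | some v => k ++ "=" ++ v]) acc) []
  PySem.Str.join "&" newQuery

-- ===== PORT B =====
-- pair(seg): (z[0], "") if len(z) == 1 else (z[0], "=" + z[1])
def pvPairKey (seg : String) : String × String :=
  let z := pvSplitEq1 seg
  if z.length = 1 then ((PySem.List.pyGet? z 0).getD "", "")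
  else ((PySem.List.pyGet? z 0).getD "", "=" ++ (PySem.List.pyGet? z 1).getD "")

def url_param_sorted_alt (query : String) : String :=
  PySem.Str.join "&"
    (PySem.List.sorted2 ((PySem.Chars.splitOn query.toList ['&']).map String.ofList)
      (fun s => (pvPairKey s).1) (fun s => (pvPairKey s).2) false)

-- ===== PRECONDITION & SPEC =====
def Spec_url_param_sorted (query : String) (out : String) : Prop := out = url_param_sorted_alt query
instance (query : String) (out : String) : Decidable (Spec_url_param_sorted query out) := by unfold Spec_url_param_sorted; infer_instance

-- ===== CLAIM (what is proved, stated in full; the proofs are below) =====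
def Claim_equal_url_param_sorted : Prop := ∀ (query : String), Dom_url_param_sorted query → Spec_url_param_sorted query (url_param_sorted query)

-- ===== LEMMAS AND PROOFS =====

-- abstract description of i.split("=", 1): break at the first '='
def pvKey (s : String) : String := String.ofList (s.toList.takeWhile (· ≠ '='))
def pvVal (s : String) : Option String :=
  if '=' ∈ s.toList then some (String.ofList ((s.toList.dropWhile (· ≠ '=')).drop 1)) else none
def pvKeyOpt : Option String → String := fun s => match s with | none => "" | some v => "=" ++ v
def pvFmt (k : String) (o : Option String) : String := match o with | none => k | some v => k ++ "=" ++ v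
def pvLexKey (s : String) : Lex (String × String) := toLex (pvKey s, pvKeyOpt (pvVal s))

lemma pvGoZero (fuel : Nat) (l : List Char) (acc : List (List Char)) (h : 0 < fuel) :
    PySem.Chars.splitOnMax.go ['='] fuel 0 l [] acc = acc.reverse ++ [l] := by
  match fuel, l with
  | f+1, [] => simp [PySem.Chars.splitOnMax.go]
  | f+1, c :: rest => simp [PySem.Chars.splitOnMax.go]

lemma pvGoOne (l : List Char) : ∀ (fuel : Nat) (cur : List Char) (acc : List (List Char)),
    l.length < fuel →
    PySem.Chars.splitOnMax.go ['='] fuel 1 l cur acc =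
      if '=' ∈ l then acc.reverse ++ [cur.reverse ++ l.takeWhile (· ≠ '='), ((l.dropWhile (· ≠ '=')).drop 1)]
      else acc.reverse ++ [cur.reverse ++ l] := by
  induction l with
  | nil =>
      intro fuel cur acc h
      match fuel with
      | f+1 => simp [PySem.Chars.splitOnMax.go]
  | cons c rest ih =>
      intro fuel cur acc h
      match fuel with
      | f+1 =>
        rw [PySem.Chars.splitOnMax.go]
        by_cases hc : c = '='
        · subst hc
          have hpre : List.isPrefixOf ['='] ('=' :: rest) = true := by simp [List.isPrefixOf]
          simp only [if_neg (by omega : ¬ (1:Nat) = 0), hpre]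
          have hf : 0 < f := by simp at h; omega
          simp only [if_true, List.length_singleton, List.drop_succ_cons, List.drop_zero]
          rw [pvGoZero f rest (cur.reverse :: acc) hf]
          simp [List.takeWhile, List.dropWhile]
        · have hpre : List.isPrefixOf ['='] (c :: rest) = false := by
            simp [List.isPrefixOf]
            exact fun h => hc h.symm
          simp only [if_neg (by omega : ¬ (1:Nat) = 0), hpre]
          rw [ih f (c :: cur) acc (by simp at h ⊢; omega)]
          by_cases hm : '=' ∈ rest <;>
            simp [hm, hc, List.takeWhile, List.dropWhile, List.mem_cons, Ne.symm hc]

lemma pvDropWhileMem (l : List Char) (h : '=' ∈ l) :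
    l.dropWhile (· ≠ '=') = '=' :: ((l.dropWhile (· ≠ '=')).drop 1) := by
  have h1 : l.dropWhile (· ≠ '=') ≠ [] := by
    simp only [ne_eq, List.dropWhile_eq_nil_iff, not_forall]
    exact ⟨'=', h, by simp⟩
  obtain ⟨c, t, he⟩ := List.exists_cons_of_ne_nil h1
  have h2 := List.head_dropWhile_not (p := (· ≠ '=')) h1
  simp only [he, List.head_cons] at h2 ⊢
  simp at h2
  simp [h2]

lemma pvKeyOfNoEq (s : String) (h : '=' ∉ s.toList) : pvKey s = s := by
  unfold pvKey
  have : s.toList.takeWhile (· ≠ '=') = s.toList := by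
    apply List.takeWhile_eq_self_iff.mpr
    intro x hx; simp; exact fun he => h (he ▸ hx)
  rw [this, String.ofList_toList]

lemma pvSplitEq1_eq (s : String) :
    pvSplitEq1 s = if '=' ∈ s.toList then [pvKey s, String.ofList ((s.toList.dropWhile (· ≠ '=')).drop 1)]
                   else [s] := by
  unfold pvSplitEq1 PySem.Chars.splitOnMax
  rw [if_neg (by norm_num)]
  have ht1 : Int.toNat 1 = 1 := rfl
  rw [ht1]
  rw [pvGoOne s.toList (s.toList.length + 1) [] [] (by omega)]
  by_cases hm : '=' ∈ s.toList
  · simp [hm, pvKey]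
  · simp [hm, String.ofList_toList]

-- the split pieces computed by both ports, in terms of pvKey / pvVal
lemma pvParseX (s : String) :
    (PySem.List.pyGet? (pvSplitEq1 s) 0).getD "" = pvKey s := by
  rw [pvSplitEq1_eq]
  by_cases hm : '=' ∈ s.toList
  · simp [hm, PySem.List.pyGet?, PySem.List.pyIdx?]
  · simp [hm, PySem.List.pyGet?, PySem.List.pyIdx?, pvKeyOfNoEq s hm]

lemma pvParseLen (s : String) : ((pvSplitEq1 s).length = 1) ↔ '=' ∉ s.toList := by
  rw [pvSplitEq1_eq]
  by_cases hm : '=' ∈ s.toList <;> simp [hm]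

lemma pvParseY (s : String) :
    (if (pvSplitEq1 s).length = 1 then none
     else some ((PySem.List.pyGet? (pvSplitEq1 s) 1).getD "")) = pvVal s := by
  by_cases hm : '=' ∈ s.toList
  · rw [if_neg (by rw [pvParseLen]; simpa)]
    rw [pvSplitEq1_eq, if_pos hm]
    simp [pvVal, hm, PySem.List.pyGet?, PySem.List.pyIdx?]
  · rw [if_pos (by rw [pvParseLen]; exact hm)]
    simp [pvVal, hm]

lemma pvPairKey_eq (s : String) : pvPairKey s = (pvKey s, pvKeyOpt (pvVal s)) := by
  unfold pvPairKey
  by_cases hm : '=' ∈ s.toList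
  · rw [if_neg (by rw [pvParseLen]; simpa)]
    rw [pvParseX]
    have hy := pvParseY s
    rw [if_neg (by rw [pvParseLen]; simpa)] at hy
    have : pvVal s = some ((PySem.List.pyGet? (pvSplitEq1 s) 1).getD "") := hy.symm
    rw [this]
    rfl
  · rw [if_pos (by rw [pvParseLen]; exact hm)]
    rw [pvParseX]
    have hy := pvParseY s
    rw [if_pos (by rw [pvParseLen]; exact hm)] at hy
    rw [← hy]
    rfl

lemma pvKey_no_eq (s : String) : '=' ∉ (pvKey s).toList := by
  unfold pvKey
  rw [String.toList_ofList]
  intro hmem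
  have := List.mem_takeWhile_imp hmem
  simp at this

-- reconstruction: formatting the parse of a segment gives the segment back
lemma pvFmt_parse (s : String) : pvFmt (pvKey s) (pvVal s) = s := by
  by_cases hm : '=' ∈ s.toList
  · unfold pvVal
    rw [if_pos hm]
    show pvKey s ++ "=" ++ String.ofList ((s.toList.dropWhile (· ≠ '=')).drop 1) = s
    apply String.toList_inj.mp
    simp only [String.toList_append, String.toList_ofList]
    unfold pvKey
    rw [String.toList_ofList]
    have h1 : ("=" : String).toList = ['='] := rfl
    rw [h1]
    have h2 := pvDropWhileMem s.toList hm
    calc s.toList.takeWhile (· ≠ '=') ++ ['='] ++ (s.toList.dropWhile (· ≠ '=')).drop 1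
        = s.toList.takeWhile (· ≠ '=') ++ ('=' :: (s.toList.dropWhile (· ≠ '=')).drop 1) := by simp
      _ = s.toList.takeWhile (· ≠ '=') ++ s.toList.dropWhile (· ≠ '=') := by rw [← h2]
      _ = s.toList := List.takeWhile_append_dropWhile
  · unfold pvVal
    rw [if_neg hm]
    show pvKey s = s
    exact pvKeyOfNoEq s hm

-- parsing a formatted pair with '='-free key gives the pair back
lemma pvParse_fmt (k : String) (o : Option String) (hk : '=' ∉ k.toList) :
    pvKey (pvFmt k o) = k ∧ pvVal (pvFmt k o) = o := by
  cases o with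
  | none =>
      constructor
      · exact pvKeyOfNoEq k hk
      · unfold pvVal
        rw [if_neg (by simpa [pvFmt] using hk)]
  | some v =>
      have htl : (pvFmt k (some v)).toList = k.toList ++ '=' :: v.toList := by
        show (k ++ "=" ++ v).toList = _
        simp only [String.toList_append]
        have h1 : ("=" : String).toList = ['='] := rfl
        rw [h1]; simp
      have htake : (k.toList ++ '=' :: v.toList).takeWhile (· ≠ '=') = k.toList := by
        rw [List.takeWhile_append_of_pos]
        · simp [List.takeWhile]
        · intro x hx; simp; exact fun he => hk (he ▸ hx)
      have hdrop : (k.toList ++ '=' :: v.toList).dropWhile (· ≠ '=') = '=' :: v.toList := by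
        rw [List.dropWhile_append_of_pos]
        · simp [List.dropWhile]
        · intro x hx; simp; exact fun he => hk (he ▸ hx)
      have hmem : '=' ∈ (pvFmt k (some v)).toList := by rw [htl]; simp
      constructor
      · unfold pvKey
        rw [htl, htake, String.ofList_toList]
      · unfold pvVal
        rw [if_pos hmem, htl, hdrop]
        simp [String.ofList_toList]

lemma pvKeyOpt_inj : Function.Injective pvKeyOpt := by
  intro a b h
  cases a with
  | none =>
      cases b with
      | none => rfl
      | some w =>
          exfalso
          have := congrArg String.toList h
          simp [pvKeyOpt, String.toList_append] at this
  | some v =>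
      cases b with
      | none =>
          exfalso
          have := congrArg String.toList h
          simp [pvKeyOpt, String.toList_append] at this
      | some w =>
          have := congrArg String.toList h
          simp only [pvKeyOpt, String.toList_append] at this
          simp at this
          rw [String.toList_inj.mpr rfl] at this
          exact congrArg some (String.toList_inj.mp this)

lemma pvLexKey_inj : Function.Injective pvLexKey := by
  intro a b h
  unfold pvLexKey at h
  have hp : (pvKey a, pvKeyOpt (pvVal a)) = (pvKey b, pvKeyOpt (pvVal b)) := h
  have h1 : pvKey a = pvKey b := congrArg Prod.fst hp
  have h2 : pvVal a = pvVal b := pvKeyOpt_inj (congrArg Prod.snd hp)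
  calc a = pvFmt (pvKey a) (pvVal a) := (pvFmt_parse a).symm
    _ = pvFmt (pvKey b) (pvVal b) := by rw [h1, h2]
    _ = b := pvFmt_parse b

lemma pvLexKey_fmt (k : String) (o : Option String) (hk : '=' ∉ k.toList) :
    pvLexKey (pvFmt k o) = toLex (k, pvKeyOpt o) := by
  unfold pvLexKey
  rw [(pvParse_fmt k o hk).1, (pvParse_fmt k o hk).2]

-- A's loop body is Dict.modify
lemma pvStep_eq (d : PySem.Dict String (List (Option String))) (x : String) (y : Option String) :
    (let d1 := d.setdefault x [];
     d1.insert x (d1.getD x [] ++ [y])) = d.modify x [] (· ++ [y]) := by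
  show (d.setdefault x []).insert x ((d.setdefault x []).getD x [] ++ [y]) = _
  by_cases hc : d.contains x
  · rw [PySem.Dict.setdefault_of_contains _ _ hc]
    rfl
  · rw [PySem.Dict.setdefault_of_not_contains _ _ (by simpa using hc)]
    rw [PySem.Dict.getD_insert_self, PySem.Dict.insert_insert_self]
    show d.insert x ([] ++ [y]) = d.insert x (d.getD x [] ++ [y])
    rw [PySem.Dict.getD_of_not_contains _ _ (by simpa using hc)]

-- group-by then concatenate in any (nodup, covering) key order is a permutation
lemma pvFlatMapFilterPerm (ks : List String) (l : List (String × Option String))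
    (hnd : ks.Nodup) (hcov : ∀ p ∈ l, p.1 ∈ ks) :
    (ks.flatMap (fun k => l.filter (fun p => p.1 == k))).Perm l := by
  induction ks generalizing l with
  | nil =>
      have hl : l = [] := by
        cases l with
        | nil => rfl
        | cons a t => exact absurd (hcov a (by simp)) (by simp)
      simp [hl]
  | cons k ks ih =>
      have hk : k ∉ ks := (List.nodup_cons.mp hnd).1
      have hnd' : ks.Nodup := (List.nodup_cons.mp hnd).2
      rw [List.flatMap_cons]
      have hfilt : ∀ c ∈ ks, l.filter (fun p => p.1 == c)
          = (l.filter (fun p => !(p.1 == k))).filter (fun p => p.1 == c) := by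
        intro c hc
        rw [List.filter_filter]
        apply (List.filter_congr ?_).symm
        intro p _
        by_cases hpc : p.1 = c
        · have hck : c ≠ k := fun he => hk (he ▸ hc)
          simp [hpc, hck]
        · simp [hpc]
      have hflat : ks.flatMap (fun c => l.filter (fun p => p.1 == c))
          = ks.flatMap (fun c => (l.filter (fun p => !(p.1 == k))).filter (fun p => p.1 == c)) :=
        List.flatMap_congr (by intro c hc; exact hfilt c hc)
      rw [hflat]
      have hcov' : ∀ p ∈ l.filter (fun p => !(p.1 == k)), p.1 ∈ ks := by
        intro p hp
        rcases List.mem_filter.mp hp with ⟨hpl, hpk⟩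
        rcases List.mem_cons.mp (hcov p hpl) with h | h
        · exfalso; simp [h] at hpk
        · exact h
      have := ih (l.filter (fun p => !(p.1 == k))) hnd' hcov'
      exact (this.append_left _).trans (List.filter_append_perm _ l)

-- B's sorted2 is sorted under the lexicographic pair key
lemma pvSorted2_eq (xs : List String) :
    PySem.List.sorted2 xs (fun s => (pvPairKey s).1) (fun s => (pvPairKey s).2) false
      = PySem.List.sorted xs pvLexKey false := by
  show xs.foldl (fun acc x => PySem.List.insertBy
      (fun a b => decide ((pvPairKey a).1 < (pvPairKey b).1) ||
        (!decide ((pvPairKey b).1 < (pvPairKey a).1) && decide ((pvPairKey a).2 < (pvPairKey b).2))) x acc) []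
    = PySem.List.sorted xs pvLexKey false
  rw [PySem.List.sorted_eq_foldl_insertBy]
  have hfun : (fun (a b : String) => decide ((pvPairKey a).1 < (pvPairKey b).1) ||
        (!decide ((pvPairKey b).1 < (pvPairKey a).1) && decide ((pvPairKey a).2 < (pvPairKey b).2)))
      = (fun a b => decide (pvLexKey a < pvLexKey b)) := by
    funext a b
    rw [pvPairKey_eq a, pvPairKey_eq b]
    unfold pvLexKey
    by_cases h1 : pvKey a < pvKey b
    · simp [h1, Prod.Lex.toLex_lt_toLex]
    · by_cases h2 : pvKey b < pvKey a
      · simp [h1, h2, Prod.Lex.toLex_lt_toLex]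
        intro he
        exact absurd (he ▸ h2) (lt_irrefl _)
      · have he : pvKey a = pvKey b := le_antisymm (not_lt.mp h2) (not_lt.mp h1)
        by_cases h3 : pvKeyOpt (pvVal a) < pvKeyOpt (pvVal b) <;>
          simp [h3, Prod.Lex.toLex_lt_toLex, he]
  rw [hfun]

-- the dict A builds, in clean form
def pvD (segs : List String) : PySem.Dict String (List (Option String)) :=
  segs.foldl (fun d i => d.modify (pvKey i) [] (· ++ [pvVal i])) PySem.Dict.empty

lemma pvPairwiseFlatMap (ks : List String) (g : String → List String)
    (hpw : ks.Pairwise (· < ·))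
    (hkey : ∀ k ∈ ks, ∀ s ∈ g k, pvKey s = k)
    (hin : ∀ k ∈ ks, (g k).Pairwise (fun a b => pvLexKey a ≤ pvLexKey b)) :
    (ks.flatMap g).Pairwise (fun a b => pvLexKey a ≤ pvLexKey b) := by
  induction ks with
  | nil => simp
  | cons k ks ih =>
      rw [List.flatMap_cons, List.pairwise_append]
      refine ⟨hin k (by simp), ih (List.pairwise_cons.mp hpw).2
        (fun c hc => hkey c (List.mem_cons_of_mem _ hc))
        (fun c hc => hin c (List.mem_cons_of_mem _ hc)), ?_⟩
      intro a ha b hb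
      obtain ⟨k', hk', hbk'⟩ := List.mem_flatMap.mp hb
      have h1 : pvKey a = k := hkey k (by simp) a ha
      have h2 : pvKey b = k' := hkey k' (List.mem_cons_of_mem _ hk') b hbk'
      have hlt : k < k' := (List.pairwise_cons.mp hpw).1 k' hk'
      apply le_of_lt
      show toLex (pvKey a, pvKeyOpt (pvVal a)) < toLex (pvKey b, pvKeyOpt (pvVal b))
      exact Prod.Lex.toLex_lt_toLex.mpr (Or.inl (by rw [h1, h2]; exact hlt))

lemma pvNewQueryEq (segs : List String) :
    ((PySem.List.sorted (pvD segs).keys (fun s => s) false).foldl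
      (fun acc k => (PySem.List.sorted ((pvD segs).getD k []) pvKeyOpt false).foldl
        (fun acc i => acc ++ [pvFmt k i]) acc) [])
      = PySem.List.sorted segs pvLexKey false := by
  have hDfold : pvD segs
      = (segs.map (fun s => (pvKey s, pvVal s))).foldl
          (fun d p => d.modify p.1 [] (· ++ [p.2])) PySem.Dict.empty := by
    unfold pvD; rw [List.foldl_map]
  have hkeys : (pvD segs).keys = PySem.Set.ofList (segs.map pvKey) := by
    rw [hDfold, PySem.Dict.keys_foldl_modify_key]
    rw [PySem.Dict.keys_empty]
    show PySem.Set.ofList _ = _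
    rw [List.map_map]
    rfl
  have hnodup : (pvD segs).keys.Nodup := by
    rw [hDfold]
    exact PySem.Dict.nodup_keys_foldl_modify_key _ _ _ _ _ (by rw [PySem.Dict.keys_empty]; exact List.nodup_nil)
  have hvals : ∀ k, (pvD segs).getD k []
      = ((segs.map (fun s => (pvKey s, pvVal s))).filter (fun p => p.1 == k)).map (·.2) := by
    intro k
    rw [hDfold, PySem.Dict.getD_foldl_modify_append, PySem.Dict.getD_empty]
    simp
  have hKSmem : ∀ k, k ∈ PySem.List.sorted (pvD segs).keys (fun s => s) false ↔ k ∈ segs.map pvKey := by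
    intro k
    rw [PySem.List.mem_sorted, hkeys, PySem.Set.mem_ofList]
  have hKSnd : (PySem.List.sorted (pvD segs).keys (fun s => s) false).Nodup :=
    ((PySem.List.sorted_perm _ _ _).nodup_iff).mpr hnodup
  have hKSpw : (PySem.List.sorted (pvD segs).keys (fun s => s) false).Pairwise (· < ·) := by
    have hle := PySem.List.sorted_pairwise (pvD segs).keys (fun s => s)
    exact (hle.and hKSnd).imp (fun h => lt_of_le_of_ne h.1 h.2)
  have hKSfree : ∀ k ∈ PySem.List.sorted (pvD segs).keys (fun s => s) false, '=' ∉ k.toList := by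
    intro k hk
    obtain ⟨s0, _, hs0⟩ := List.mem_map.mp ((hKSmem k).mp hk)
    exact hs0 ▸ pvKey_no_eq s0
  -- reshape the two nested loops into a flatMap of maps
  rw [PySem.List.foldl_congr_mem _ _
    (fun acc k => acc ++ (PySem.List.sorted ((pvD segs).getD k []) pvKeyOpt false).map (pvFmt k)) _
    (fun acc k _ => PySem.List.foldl_append_singleton_eq_map _ _ _)]
  rw [PySem.List.foldl_append_eq_flatMap, List.nil_append]
  -- permutation with segs
  have hperm : ((PySem.List.sorted (pvD segs).keys (fun s => s) false).flatMap
      (fun k => (PySem.List.sorted ((pvD segs).getD k []) pvKeyOpt false).map (pvFmt k))).Perm segs := by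
    have h1 : ((PySem.List.sorted (pvD segs).keys (fun s => s) false).flatMap
        (fun k => (PySem.List.sorted ((pvD segs).getD k []) pvKeyOpt false).map (pvFmt k))).Perm
        ((PySem.List.sorted (pvD segs).keys (fun s => s) false).flatMap
          (fun k => ((segs.map (fun s => (pvKey s, pvVal s))).filter (fun p => p.1 == k)).map
            (fun p => pvFmt p.1 p.2))) := by
      refine List.Perm.flatMap (List.Perm.refl _) ?_
      intro k _
      have hp : (PySem.List.sorted ((pvD segs).getD k []) pvKeyOpt false).Perm ((pvD segs).getD k []) :=
        PySem.List.sorted_perm _ _ _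
      refine (hp.map (pvFmt k)).trans ?_
      rw [hvals k, List.map_map]
      apply List.Perm.of_eq
      apply List.map_congr_left
      intro p hp2
      have : p.1 = k := by
        have := (List.mem_filter.mp hp2).2
        simpa using this
      simp [Function.comp, this]
    refine h1.trans ?_
    rw [← List.map_flatMap]
    have h2 := pvFlatMapFilterPerm (PySem.List.sorted (pvD segs).keys (fun s => s) false)
      (segs.map (fun s => (pvKey s, pvVal s))) hKSnd ?_
    · refine (h2.map _).trans ?_
      rw [List.map_map]
      apply List.Perm.of_eq
      have : ∀ s ∈ segs, ((fun p => pvFmt p.1 p.2) ∘ (fun s => (pvKey s, pvVal s))) s = id s := by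
        intro s _
        show pvFmt (pvKey s) (pvVal s) = s
        exact pvFmt_parse s
      rw [List.map_congr_left this, List.map_id]
    · intro p hp
      obtain ⟨s0, hs0, he⟩ := List.mem_map.mp hp
      rw [hKSmem]
      exact List.mem_map.mpr ⟨s0, hs0, by rw [← he]⟩
  -- sortedness
  have hpw : ((PySem.List.sorted (pvD segs).keys (fun s => s) false).flatMap
      (fun k => (PySem.List.sorted ((pvD segs).getD k []) pvKeyOpt false).map (pvFmt k))).Pairwise
      (fun a b => pvLexKey a ≤ pvLexKey b) := by
    apply pvPairwiseFlatMap _ _ hKSpw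
    · intro k hk s hs
      obtain ⟨y, _, he⟩ := List.mem_map.mp hs
      rw [← he]
      exact (pvParse_fmt k y (hKSfree k hk)).1
    · intro k hk
      rw [List.pairwise_map]
      have hs := PySem.List.sorted_pairwise ((pvD segs).getD k []) pvKeyOpt
      refine hs.imp ?_
      intro y1 y2 h
      rw [pvLexKey_fmt k y1 (hKSfree k hk), pvLexKey_fmt k y2 (hKSfree k hk)]
      exact Prod.Lex.toLex_le_toLex.mpr (Or.inr ⟨rfl, h⟩)
  exact PySem.List.eq_of_perm_of_pairwise_le_of_injective pvLexKey pvLexKey_inj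
    (hperm.trans (PySem.List.sorted_perm segs pvLexKey false).symm) hpw
    (PySem.List.sorted_pairwise segs pvLexKey)

lemma pvListsEq (segs : List String) :
    ((PySem.List.sorted (segs.foldl (fun d i =>
        let z := pvSplitEq1 i
        let x := (PySem.List.pyGet? z 0).getD ""
        let y : Option String := if z.length = 1 then none else some ((PySem.List.pyGet? z 1).getD "")
        let d1 := d.setdefault x []
        d1.insert x (d1.getD x [] ++ [y])) PySem.Dict.empty).keys (fun s => s) false).foldl
      (fun acc k => (PySem.List.sorted ((segs.foldl (fun d i =>
        let z := pvSplitEq1 i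
        let x := (PySem.List.pyGet? z 0).getD ""
        let y : Option String := if z.length = 1 then none else some ((PySem.List.pyGet? z 1).getD "")
        let d1 := d.setdefault x []
        d1.insert x (d1.getD x [] ++ [y])) PySem.Dict.empty).getD k [])
          (fun s => match s with | none => "" | some v => "=" ++ v) false).foldl
        (fun acc i => acc ++ [match i with | none => k | some v => k ++ "=" ++ v]) acc) [])
      = PySem.List.sorted segs pvLexKey false := by
  have hA : (segs.foldl (fun d i =>
        let z := pvSplitEq1 i
        let x := (PySem.List.pyGet? z 0).getD ""
        let y : Option String := if z.length = 1 then none else some ((PySem.List.pyGet? z 1).getD "")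
        let d1 := d.setdefault x []
        d1.insert x (d1.getD x [] ++ [y])) PySem.Dict.empty) = pvD segs := by
    unfold pvD
    apply PySem.List.foldl_congr_mem
    intro acc i _
    show ((acc.setdefault ((PySem.List.pyGet? (pvSplitEq1 i) 0).getD "") []).insert
        ((PySem.List.pyGet? (pvSplitEq1 i) 0).getD "")
        ((acc.setdefault ((PySem.List.pyGet? (pvSplitEq1 i) 0).getD "") []).getD
          ((PySem.List.pyGet? (pvSplitEq1 i) 0).getD "") []
          ++ [if (pvSplitEq1 i).length = 1 then none
              else some ((PySem.List.pyGet? (pvSplitEq1 i) 1).getD "")]))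
      = acc.modify (pvKey i) [] (· ++ [pvVal i])
    rw [pvParseX, pvParseY]
    exact pvStep_eq acc (pvKey i) (pvVal i)
  rw [hA]
  show ((PySem.List.sorted (pvD segs).keys (fun s => s) false).foldl
      (fun acc k => (PySem.List.sorted ((pvD segs).getD k []) pvKeyOpt false).foldl
        (fun acc i => acc ++ [pvFmt k i]) acc) [])
      = PySem.List.sorted segs pvLexKey false
  exact pvNewQueryEq segs

-- ===== VERDICT (by name: the statement is the Claim_ definition above) =====
theorem url_param_sorted_spec : Claim_equal_url_param_sorted := by
  intro query _
  show url_param_sorted query = url_param_sorted_alt query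
  unfold url_param_sorted url_param_sorted_alt
  rw [pvSorted2_eq]
  exact congrArg (PySem.Str.join "&")
    (pvListsEq ((PySem.Chars.splitOn query.toList ['&']).map String.ofList))
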